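-- pv_equiv track=rewrite | github.com/huiminlim/advent-of-code | 2024/python/day_02/main.py | is_safe_delta
-- ===== SOURCE A (Python) =====
-- def is_safe_delta(lst):
--     delta = []
--     for idx in range(len(lst)-1):
--         delta.append(abs(lst[idx] - lst[idx+1]))
--     for d in delta:
--         if not(d >= 1 and d <= 3):
--             return False
--     return True
-- ===== SOURCE B (Python) =====
-- def is_safe_delta(lst):
--     # Single pass folding (ok, prev) over the elements: for each consecutive
--     # pair the squared difference d*d must lie in [1, 9], which for integers
--     # is exactly |d| in [1, 3].
--     ok = True
--     prev = None
--     for x in lst: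
--         if prev is not None:
--             d = prev - x
--             ok = ok and 1 <= d * d <= 9
--         prev = x
--     return ok
-- ===== Notes on version B (the rewrite author's own statement) =====
-- stated objective: alternative
-- what changed: B replaces A's build-a-delta-list-then-scan-it staging and abs-range test with a single fold over the elements carrying (ok, prev) and testing the squared difference 1 <= d*d <= 9, maintaining no intermediate structure and doing no indexing.
import Mathlib
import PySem

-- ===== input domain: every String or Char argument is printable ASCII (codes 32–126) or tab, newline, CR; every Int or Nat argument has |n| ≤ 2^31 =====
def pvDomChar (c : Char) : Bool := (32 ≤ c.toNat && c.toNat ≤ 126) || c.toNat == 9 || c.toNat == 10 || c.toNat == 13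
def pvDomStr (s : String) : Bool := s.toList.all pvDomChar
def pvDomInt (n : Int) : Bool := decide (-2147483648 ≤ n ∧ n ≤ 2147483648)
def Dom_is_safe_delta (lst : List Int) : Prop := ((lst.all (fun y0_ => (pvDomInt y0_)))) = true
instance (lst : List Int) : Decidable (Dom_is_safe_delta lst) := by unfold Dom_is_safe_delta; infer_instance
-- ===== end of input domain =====

-- B replaces A's staged build-a-delta-list-then-scan with one fold over the elements
-- carrying (ok, prev) and a squared-difference test 1 ≤ d*d ≤ 9 (alternative; same O(n) cost).

-- ===== PORT A =====
-- second loop of A: early-return scan of the delta list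
def pvCheckDeltas : List Int → Bool
  | [] => true
  | d :: rest => if ¬(d ≥ 1 ∧ d ≤ 3) then false else pvCheckDeltas rest

-- first loop of A: indices are always in range (0 ≤ idx < len-1), so pyGetD with default 0 is exact here
def is_safe_delta (lst : List Int) : Bool :=
  let delta := (PySem.List.pyRange 0 ((lst.length : Int) - 1) 1).foldl
    (fun acc idx => acc ++ [|PySem.List.pyGetD lst idx 0 - PySem.List.pyGetD lst (idx + 1) 0|]) []
  pvCheckDeltas delta

-- ===== PORT B =====
-- fold step of B's single loop: state is (ok so far, previous element)
def pvStep (s : Bool × Option Int) (x : Int) : Bool × Option Int :=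
  match s.2 with
  | none => (s.1, some x)
  | some p => (s.1 && decide (1 ≤ (p - x) * (p - x) ∧ (p - x) * (p - x) ≤ 9), some x)

def is_safe_delta_alt (lst : List Int) : Bool :=
  (lst.foldl pvStep (true, none)).1

-- ===== PRECONDITION & SPEC =====
def Spec_is_safe_delta (lst : List Int) (out : Bool) : Prop := out = is_safe_delta_alt lst
instance (lst : List Int) (out : Bool) : Decidable (Spec_is_safe_delta lst out) := by unfold Spec_is_safe_delta; infer_instance

-- ===== CLAIM (what is proved, stated in full; the proofs are below) =====
def Claim_equal_is_safe_delta : Prop := ∀ (lst : List Int), Dom_is_safe_delta lst → Spec_is_safe_delta lst (is_safe_delta lst)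

-- ===== LEMMAS AND PROOFS =====

-- A's second loop is an `all` over the delta list
theorem pvCheckDeltas_eq_all (ds : List Int) :
    pvCheckDeltas ds = ds.all (fun d => decide (1 ≤ d ∧ d ≤ 3)) := by
  induction ds with
  | nil => rfl
  | cons d rest ih =>
      simp only [pvCheckDeltas, List.all_cons, ih]
      by_cases h : 1 ≤ d ∧ d ≤ 3 <;> simp [h]

-- A's delta list equals the per-pair map over zipped neighbours
theorem pvDelta_eq_map (lst : List Int) :
    (PySem.List.pyRange 0 ((lst.length : Int) - 1) 1).foldl
      (fun acc idx => acc ++ [|PySem.List.pyGetD lst idx 0 - PySem.List.pyGetD lst (idx + 1) 0|]) []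
    = (lst.zip lst.tail).map (fun p => |p.1 - p.2|) := by
  rw [PySem.List.foldl_append_singleton_eq_map, List.nil_append]
  apply List.ext_getElem
  · simp [PySem.List.length_pyRange_one, List.length_zip]
  · intro k hk1 hk2
    have hlen : (PySem.List.pyRange 0 ((lst.length : Int) - 1) 1).length = lst.length - 1 := by
      simp [PySem.List.length_pyRange_one]
    have hk : k < lst.length - 1 := by simpa [hlen] using hk1
    have hkl : k + 1 < lst.length := by omega
    have hget : (PySem.List.pyRange 0 ((lst.length : Int) - 1) 1)[k]'(by rw [hlen]; omega) = (k : Int) := by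
      rw [PySem.List.getElem_pyRange_one]; ring
    simp only [List.getElem_map, hget]
    have h1 : PySem.List.pyGetD lst (k : Int) 0 = lst[k]'(by omega) :=
      by rw [PySem.List.pyGetD_natCast]; exact List.getD_eq_getElem _ _ (by omega)
    have h2 : PySem.List.pyGetD lst ((k : Int) + 1) 0 = lst[k + 1]'hkl := by
      have : ((k : Int) + 1) = ((k + 1 : Nat) : Int) := by push_cast; ring
      rw [this]
      rw [PySem.List.pyGetD_natCast]; exact List.getD_eq_getElem _ _ hkl
    rw [h1, h2]
    simp [List.getElem_zip, List.getElem_tail]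

-- the squared-difference test agrees with the abs-range test on integers
theorem pvSq_iff_abs (d : Int) :
    (1 ≤ d * d ∧ d * d ≤ 9) ↔ (1 ≤ |d| ∧ |d| ≤ 3) := by
  have habs : |d| * |d| = d * d := abs_mul_abs_self d
  have h0 : 0 ≤ |d| := abs_nonneg d
  constructor
  · rintro ⟨h1, h2⟩
    constructor <;> nlinarith
  · rintro ⟨h1, h2⟩
    constructor <;> nlinarith

-- B's fold, once a previous element exists, computes the conjunction over adjacent pairs
theorem pvStep_foldl (xs : List Int) : ∀ (b : Bool) (p : Int),
    (xs.foldl pvStep (b, some p)).1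
      = (b && ((p :: xs).zip xs).all
          (fun q => decide (1 ≤ (q.1 - q.2) * (q.1 - q.2) ∧ (q.1 - q.2) * (q.1 - q.2) ≤ 9))) := by
  induction xs with
  | nil => intro b p; simp
  | cons x rest ih =>
      intro b p
      simp only [List.foldl_cons, pvStep, List.zip_cons_cons, List.all_cons]
      rw [ih]
      cases rest with
      | nil => simp
      | cons y ys => simp [Bool.and_assoc]

-- ===== VERDICT (by name: the statement is the Claim_ definition above) =====
theorem is_safe_delta_spec : Claim_equal_is_safe_delta := by
  intro lst _
  unfold Spec_is_safe_delta is_safe_delta is_safe_delta_alt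
  rw [pvDelta_eq_map, pvCheckDeltas_eq_all, List.all_map]
  cases lst with
  | nil => rfl
  | cons x xs =>
      simp only [List.foldl_cons, pvStep, List.tail_cons]
      rw [pvStep_foldl, Bool.true_and]
      cases xs with
      | nil => rfl
      | cons y ys =>
          congr 1
          funext q
          simp [pvSq_iff_abs]
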